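-- pv_equiv track=rewrite | github.com/mcarrickscott/modarith | montyms64.py | ispowerof2
-- ===== SOURCE A (Python) =====
-- def ispowerof2(n) :
--     if (n & (n-1) == 0) and n>0 :
--         e=0
--         while n>0 :
--             if (n&1)!=0 :
--                 return e
--             e=e+1
--             n>>=1
--     return -1
-- ===== SOURCE B (Python) =====
-- def ispowerof2(n):
--     if (n & (n - 1) == 0) and n > 0:
--         return n.bit_length() - 1
--     return -1
-- ===== Notes on version B (the rewrite author's own statement) =====
-- stated objective: simpler
-- what changed: Replaces the bit-scanning while-loop with the closed form n.bit_length() - 1, valid because the guard guarantees exactly one set bit.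
import Mathlib
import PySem

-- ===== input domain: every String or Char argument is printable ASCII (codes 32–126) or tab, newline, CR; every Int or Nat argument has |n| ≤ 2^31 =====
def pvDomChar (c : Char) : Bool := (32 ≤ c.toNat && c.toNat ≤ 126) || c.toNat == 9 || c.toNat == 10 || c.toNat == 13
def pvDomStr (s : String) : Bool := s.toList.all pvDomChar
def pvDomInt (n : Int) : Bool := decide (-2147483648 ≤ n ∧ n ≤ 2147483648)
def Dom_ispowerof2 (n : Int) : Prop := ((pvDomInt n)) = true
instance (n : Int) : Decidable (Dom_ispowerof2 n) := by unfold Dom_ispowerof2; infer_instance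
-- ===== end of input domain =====

-- B replaces A's bit-scanning while-loop with the closed form bit_length(n) - 1 (simpler).

-- ===== PORT A =====
-- the while-loop: while n>0: if (n&1)!=0: return e; e=e+1; n>>=1   (falls through to -1)
def ispowerof2.loop (n e : Int) : Int :=
  if h : 0 < n then
    if PySem.Int.band n 1 ≠ 0 then e
    else ispowerof2.loop (n >>> (1 : Nat)) (e + 1)
  else -1
termination_by n.toNat
decreasing_by
  have : n >>> (1 : Nat) = (↑(n.toNat >>> 1) : Int) := by
    have hn : n = (↑n.toNat : Int) := (Int.toNat_of_nonneg (le_of_lt h)).symm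
    rw [hn]; rfl
  rw [this]
  simp only [Int.toNat_natCast, Nat.shiftRight_eq_div_pow, pow_one]
  omega

def ispowerof2 (n : Int) : Int :=
  if PySem.Int.band n (n - 1) = 0 ∧ 0 < n then ispowerof2.loop n 0 else -1

-- ===== PORT B =====
def ispowerof2_alt (n : Int) : Int :=
  if PySem.Int.band n (n - 1) = 0 ∧ 0 < n then (PySem.Int.bitLength n : Int) - 1 else -1

-- ===== PRECONDITION & SPEC =====
def Spec_ispowerof2 (n : Int) (out : Int) : Prop := out = ispowerof2_alt n
instance (n : Int) (out : Int) : Decidable (Spec_ispowerof2 n out) := by unfold Spec_ispowerof2; infer_instance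

-- ===== CLAIM (what is proved, stated in full; the proofs are below) =====
def Claim_equal_ispowerof2 : Prop := ∀ (n : Int), Dom_ispowerof2 n → Spec_ispowerof2 n (ispowerof2 n)

-- ===== LEMMAS AND PROOFS =====

theorem bitLength_two_pow (k : Nat) : PySem.Int.bitLength ((2 ^ k : Nat) : Int) = k + 1 := by
  induction k with
  | zero =>
    rw [PySem.Int.bitLength_natCast (by norm_num)]
    norm_num [PySem.Int.bitLength_zero]
  | succ k ih =>
    rw [PySem.Int.bitLength_natCast (Nat.pow_pos (by norm_num))]
    have : 2 ^ (k + 1) / 2 = 2 ^ k := by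
      rw [pow_succ]; exact Nat.mul_div_cancel _ (by norm_num)
    rw [this, ih]

theorem loop_two_pow (k : Nat) (e : Int) :
    ispowerof2.loop ((2 ^ k : Nat) : Int) e = e + k := by
  induction k generalizing e with
  | zero =>
    rw [ispowerof2.loop]
    norm_num
  | succ k ih =>
    rw [ispowerof2.loop]
    have hpos : (0 : Int) < ((2 ^ (k + 1) : Nat) : Int) := by positivity
    rw [dif_pos hpos]
    have hband : PySem.Int.band ((2 ^ (k + 1) : Nat) : Int) 1 = 0 := by
      have h1 : ((1 : Nat) : Int) = (1 : Int) := rfl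
      rw [← h1, PySem.Int.band_natCast, Nat.and_one_is_mod, pow_succ, Nat.mul_mod_left]
      rfl
    rw [if_neg (not_ne_iff.mpr hband)]
    have hshift : ((2 ^ (k + 1) : Nat) : Int) >>> (1 : Nat) = ((2 ^ k : Nat) : Int) := by
      have : ((2 ^ (k + 1) : Nat) : Int) >>> (1 : Nat) = ((2 ^ (k + 1) >>> 1 : Nat) : Int) := rfl
      rw [this]
      congr 1
      rw [Nat.shiftRight_eq_div_pow, pow_one, pow_succ]
      exact Nat.mul_div_cancel _ (by norm_num)
    rw [hshift, ih]
    push_cast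
    ring

-- ===== VERDICT (by name: the statement is the Claim_ definition above) =====
theorem ispowerof2_spec : Claim_equal_ispowerof2 := by
  intro n _
  unfold Spec_ispowerof2 ispowerof2 ispowerof2_alt
  by_cases hg : PySem.Int.band n (n - 1) = 0 ∧ 0 < n
  · rw [if_pos hg, if_pos hg]
    obtain ⟨hband, hpos⟩ := hg
    -- rewrite n as a Nat cast
    obtain ⟨m, hm⟩ : ∃ m : Nat, n = (m : Int) := ⟨n.toNat, (Int.toNat_of_nonneg (le_of_lt hpos)).symm⟩
    subst hm
    have hm0 : m ≠ 0 := by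
      intro h; rw [h] at hpos; exact lt_irrefl 0 hpos
    have hmsub : ((m : Int) - 1) = ((m - 1 : Nat) : Int) := by omega
    rw [hmsub, PySem.Int.band_natCast] at hband
    have hand : m &&& (m - 1) = 0 := by exact_mod_cast hband
    obtain ⟨k, hk⟩ := (Nat.ne_zero_and_sub_one_eq_zero_iff_isPowerOfTwo).mp ⟨hm0, hand⟩
    subst hk
    rw [loop_two_pow, bitLength_two_pow]
    push_cast
    ring
  · rw [if_neg hg, if_neg hg]
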